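-- pv_equiv track=rewrite | github.com/fkshohag/All-algorithm | Codinginterview/turing/count_perfect_set.py | count_perfect_sets
-- ===== SOURCE A (Python) =====
-- def count_perfect_sets(balls, x, y, z):
--     n = len(balls)
--     count = 0
--
--     for i in range(n):
--         for j in range(i+1, n):
--             for k in range(j+1, n):
--                 if abs(balls[i] - balls[j]) <= x \
--                 and abs(balls[j] - balls[k]) <= y \
--                 and abs(balls[i] - balls[k]) <= z:
--                     count += 1
--     return count
-- ===== SOURCE B (Python) =====
-- def _bisect_left(a, v):
--     lo, hi = 0, len(a)
--     while lo < hi: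
--         mid = (lo + hi) // 2
--         if a[mid] < v:
--             lo = mid + 1
--         else:
--             hi = mid
--     return lo
--
--
-- def _bisect_right(a, v):
--     lo, hi = 0, len(a)
--     while lo < hi:
--         mid = (lo + hi) // 2
--         if v < a[mid]:
--             hi = mid
--         else:
--             lo = mid + 1
--     return lo
--
--
-- def count_perfect_sets(balls, x, y, z):
--     # Fix the middle index j; among earlier values within x of balls[j] (left)
--     # and later values within y of balls[j] (right, kept sorted), count the
--     # pairs whose own distance is within z by two binary searches per left value.
--     if x < 0 or y < 0 or z < 0:
--         return 0
--     n = len(balls)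
--     total = 0
--     for j in range(n):
--         bj = balls[j]
--         left = [v for v in balls[:j] if abs(v - bj) <= x]
--         right = sorted(v for v in balls[j + 1:] if abs(bj - v) <= y)
--         for a in left:
--             total += _bisect_right(right, a + z) - _bisect_left(right, a - z)
--     return total
-- ===== Notes on version B (the rewrite author's own statement) =====
-- stated objective: faster
-- what changed: Instead of A's brute-force triple loop over all index triples, B fixes the middle index j, filters earlier values within x of balls[j] and later values within y of balls[j], sorts the latter once per j, and counts the valid pairs with two binary searches per left value.
import Mathlib
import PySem

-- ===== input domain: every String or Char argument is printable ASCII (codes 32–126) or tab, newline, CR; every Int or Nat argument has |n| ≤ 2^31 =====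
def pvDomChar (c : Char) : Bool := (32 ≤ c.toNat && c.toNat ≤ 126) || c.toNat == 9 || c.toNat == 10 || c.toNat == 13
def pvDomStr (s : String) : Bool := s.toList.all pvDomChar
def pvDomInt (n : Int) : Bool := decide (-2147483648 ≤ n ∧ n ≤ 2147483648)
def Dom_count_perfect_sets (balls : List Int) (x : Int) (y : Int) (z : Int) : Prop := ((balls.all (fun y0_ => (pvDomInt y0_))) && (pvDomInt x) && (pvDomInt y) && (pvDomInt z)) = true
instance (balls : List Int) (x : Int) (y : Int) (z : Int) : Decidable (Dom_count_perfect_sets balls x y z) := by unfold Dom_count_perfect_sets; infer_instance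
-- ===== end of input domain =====

-- B replaces A's cubic triple loop by fixing the middle index j and counting, for each
-- earlier value within x of balls[j], the later values within y of balls[j] and within z
-- of it via two binary searches on a sorted candidate list (O(n^2 log n) vs O(n^3)).

-- ===== PORT A =====
def count_perfect_sets (balls : List Int) (x : Int) (y : Int) (z : Int) : Int :=
  let n : Int := (balls.length : Int)
  (PySem.List.pyRange 0 n 1).foldl (fun count i =>
    (PySem.List.pyRange (i + 1) n 1).foldl (fun count j =>
      (PySem.List.pyRange (j + 1) n 1).foldl (fun count k =>
        if |PySem.List.pyGetD balls i 0 - PySem.List.pyGetD balls j 0| ≤ x ∧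
           |PySem.List.pyGetD balls j 0 - PySem.List.pyGetD balls k 0| ≤ y ∧
           |PySem.List.pyGetD balls i 0 - PySem.List.pyGetD balls k 0| ≤ z
        then count + 1 else count) count) count) 0

-- ===== PORT B =====
-- Source B's _bisect_left/_bisect_right are verbatim the standard bisection loops; they are
-- ported as the prelude's primitives PySem.List.bisectLeft / bisectRight (same algorithm).
def count_perfect_sets_alt (balls : List Int) (x : Int) (y : Int) (z : Int) : Int :=
  if x < 0 ∨ y < 0 ∨ z < 0 then 0
  else
    let n : Int := (balls.length : Int)
    (PySem.List.pyRange 0 n 1).foldl (fun total j =>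
      let bj := PySem.List.pyGetD balls j 0
      let left := (PySem.List.slice balls none (some j)).filter (fun v => decide (|v - bj| ≤ x))
      let right := PySem.List.sorted
        ((PySem.List.slice balls (some (j + 1)) none).filter (fun v => decide (|bj - v| ≤ y)))
        (fun v => v) false
      left.foldl (fun total a =>
        total + ((PySem.List.bisectRight right (a + z) : Int)
                 - (PySem.List.bisectLeft right (a - z) : Int))) total) 0

-- ===== PRECONDITION & SPEC =====
def Spec_count_perfect_sets (balls : List Int) (x : Int) (y : Int) (z : Int) (out : Int) : Prop := out = count_perfect_sets_alt balls x y z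
instance (balls : List Int) (x : Int) (y : Int) (z : Int) (out : Int) : Decidable (Spec_count_perfect_sets balls x y z out) := by unfold Spec_count_perfect_sets; infer_instance

-- ===== CLAIM (what is proved, stated in full; the proofs are below) =====
def Claim_equal_count_perfect_sets : Prop := ∀ (balls : List Int) (x : Int) (y : Int) (z : Int), Dom_count_perfect_sets balls x y z → Spec_count_perfect_sets balls x y z (count_perfect_sets balls x y z)

-- ===== LEMMAS AND PROOFS =====

lemma pvCountP_eq_of_split (xs : List Int) (p : Int → Bool) (b : Nat) (hb : b ≤ xs.length)
    (h1 : ∀ (j : Nat) (hj : j < xs.length), j < b → p xs[j] = true)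
    (h2 : ∀ (j : Nat) (hj : j < xs.length), b ≤ j → p xs[j] = false) :
    xs.countP p = b := by
  conv_lhs => rw [← List.take_append_drop b xs]
  rw [List.countP_append]
  have ht : (xs.take b).countP p = (xs.take b).length := by
    rw [List.countP_eq_length]
    intro a ha
    obtain ⟨i, hi, rfl⟩ := List.mem_iff_getElem.mp ha
    have hlt : i < b := lt_of_lt_of_le hi (by simp)
    have hix : i < xs.length := lt_of_lt_of_le hlt hb
    rw [List.getElem_take]
    exact h1 i hix hlt
  have hd : (xs.drop b).countP p = 0 := by
    rw [List.countP_eq_zero]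
    intro a ha
    obtain ⟨i, hi, rfl⟩ := List.mem_iff_getElem.mp ha
    rw [List.getElem_drop]
    simp [h2 (b + i) (by simp at hi; omega) (by omega)]
  rw [ht, hd, List.length_take]
  omega

lemma pvBisectLeft_eq_countP (r : List Int) (hs : List.Pairwise (· ≤ ·) r) (v : Int) :
    PySem.List.bisectLeft r v = r.countP (fun c => decide (c < v)) := by
  obtain ⟨hle, hlo, hhi⟩ := PySem.List.bisectLeft_spec r v hs
  exact (pvCountP_eq_of_split r _ _ hle
    (fun j hj hjb => by simpa using hlo j hj hjb)
    (fun j hj hjb => by simpa using not_lt.mpr (hhi j hj hjb))).symm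

lemma pvBisectRight_eq_countP (r : List Int) (hs : List.Pairwise (· ≤ ·) r) (v : Int) :
    PySem.List.bisectRight r v = r.countP (fun c => decide (c ≤ v)) := by
  obtain ⟨hle, hlo, hhi⟩ := PySem.List.bisectRight_spec r v hs
  exact (pvCountP_eq_of_split r _ _ hle
    (fun j hj hjb => by simpa using hlo j hj hjb)
    (fun j hj hjb => by simpa using not_le.mpr (hhi j hj hjb))).symm

lemma pvCountP_window (xs : List Int) (lo hi : Int) (h : lo ≤ hi + 1) :
    xs.countP (fun c => decide (c ≤ hi))
      = xs.countP (fun c => decide (c < lo)) + xs.countP (fun c => decide (lo ≤ c ∧ c ≤ hi)) := by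
  induction xs with
  | nil => simp
  | cons a t ih =>
    simp only [List.countP_cons, ih, decide_eq_true_eq]
    split_ifs <;> omega

lemma pvBisect_window (r : List Int) (hs : List.Pairwise (· ≤ ·) r) (a z : Int) (hz : 0 ≤ z) :
    (PySem.List.bisectRight r (a + z) : Int) - (PySem.List.bisectLeft r (a - z) : Int)
      = (r.countP (fun c => decide (a - z ≤ c ∧ c ≤ a + z)) : Int) := by
  rw [pvBisectRight_eq_countP r hs, pvBisectLeft_eq_countP r hs,
    pvCountP_window r (a - z) (a + z) (by omega)]
  push_cast
  ring

lemma pvSum_filter_map (l : List Int) (p : Int → Bool) (g : Int → Int) :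
    ((l.filter p).map g).sum = (l.map (fun a => if p a then g a else 0)).sum := by
  induction l with
  | nil => simp
  | cons a t ih =>
    by_cases h : p a <;> simp [h, ih]

lemma pvSwap (F : Int → Int → Int) (N : Nat) :
    ((PySem.List.pyRange 0 (N : Int) 1).map
        (fun i => ((PySem.List.pyRange (i + 1) (N : Int) 1).map (fun j => F i j)).sum)).sum
      = ((PySem.List.pyRange 0 (N : Int) 1).map
        (fun j => ((PySem.List.pyRange 0 j 1).map (fun i => F i j)).sum)).sum := by
  induction N with
  | zero => simp [PySem.List.pyRange_one_eq_nil]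
  | succ n ih =>
    have hcast : ((n + 1 : Nat) : Int) = (n : Int) + 1 := by push_cast; ring
    rw [hcast, PySem.List.pyRange_one_succ_right (by positivity)]
    have hinner : ∀ i ∈ PySem.List.pyRange 0 (n : Int) 1,
        ((PySem.List.pyRange (i + 1) ((n : Int) + 1) 1).map (fun j => F i j)).sum
          = ((PySem.List.pyRange (i + 1) (n : Int) 1).map (fun j => F i j)).sum + F i n := by
      intro i hi
      rw [PySem.List.mem_pyRange_one] at hi
      rw [PySem.List.pyRange_one_succ_right (by omega)]
      simp
    rw [List.map_append, List.sum_append,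
        List.map_congr_left hinner,
        PySem.List.sum_map_add_int (PySem.List.pyRange 0 (n : Int) 1)
          (fun i => ((PySem.List.pyRange (i + 1) (n : Int) 1).map (fun j => F i j)).sum)
          (fun i => F i n),
        ih]
    simp [PySem.List.pyRange_one_eq_nil (le_refl ((n : Int) + 1))]

lemma pvA_eq_sum (balls : List Int) (x y z : Int) :
    count_perfect_sets balls x y z
      = ((PySem.List.pyRange 0 (balls.length : Int) 1).map
          (fun i => ((PySem.List.pyRange (i + 1) (balls.length : Int) 1).map
            (fun j => ((balls.drop (j + 1).toNat).countP (fun c =>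
              decide (|PySem.List.pyGetD balls i 0 - PySem.List.pyGetD balls j 0| ≤ x ∧
                      |PySem.List.pyGetD balls j 0 - c| ≤ y ∧
                      |PySem.List.pyGetD balls i 0 - c| ≤ z)) : Int))).sum)).sum := by
  simp only [count_perfect_sets]
  have hOuter : ∀ (acc : Int), ∀ i ∈ PySem.List.pyRange 0 (balls.length : Int) 1,
      (PySem.List.pyRange (i + 1) (balls.length : Int) 1).foldl (fun count j =>
        (PySem.List.pyRange (j + 1) (balls.length : Int) 1).foldl (fun count k =>
          if |PySem.List.pyGetD balls i 0 - PySem.List.pyGetD balls j 0| ≤ x ∧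
             |PySem.List.pyGetD balls j 0 - PySem.List.pyGetD balls k 0| ≤ y ∧
             |PySem.List.pyGetD balls i 0 - PySem.List.pyGetD balls k 0| ≤ z
          then count + 1 else count) count) acc
      = acc + ((PySem.List.pyRange (i + 1) (balls.length : Int) 1).map
            (fun j => ((balls.drop (j + 1).toNat).countP (fun c =>
              decide (|PySem.List.pyGetD balls i 0 - PySem.List.pyGetD balls j 0| ≤ x ∧
                      |PySem.List.pyGetD balls j 0 - c| ≤ y ∧
                      |PySem.List.pyGetD balls i 0 - c| ≤ z)) : Int))).sum := by
    intro acc i hi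
    rw [PySem.List.mem_pyRange_one] at hi
    have hInner : ∀ (c : Int), ∀ j ∈ PySem.List.pyRange (i + 1) (balls.length : Int) 1,
        (PySem.List.pyRange (j + 1) (balls.length : Int) 1).foldl (fun count k =>
          if |PySem.List.pyGetD balls i 0 - PySem.List.pyGetD balls j 0| ≤ x ∧
             |PySem.List.pyGetD balls j 0 - PySem.List.pyGetD balls k 0| ≤ y ∧
             |PySem.List.pyGetD balls i 0 - PySem.List.pyGetD balls k 0| ≤ z
          then count + 1 else count) c
        = c + ((balls.drop (j + 1).toNat).countP (fun c =>
              decide (|PySem.List.pyGetD balls i 0 - PySem.List.pyGetD balls j 0| ≤ x ∧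
                      |PySem.List.pyGetD balls j 0 - c| ≤ y ∧
                      |PySem.List.pyGetD balls i 0 - c| ≤ z)) : Int) := by
      intro c j hj
      rw [PySem.List.mem_pyRange_one] at hj
      rw [PySem.List.foldl_pyRange_pyGetD' balls 0
            (fun count v =>
              if |PySem.List.pyGetD balls i 0 - PySem.List.pyGetD balls j 0| ≤ x ∧
                 |PySem.List.pyGetD balls j 0 - v| ≤ y ∧
                 |PySem.List.pyGetD balls i 0 - v| ≤ z
              then count + 1 else count) c (by omega),
          PySem.List.foldl_ite_add_one]
    rw [PySem.List.foldl_congr_mem _ _ _ acc hInner, PySem.List.foldl_add]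
  rw [PySem.List.foldl_congr_mem _ _ _ 0 hOuter, PySem.List.foldl_add, zero_add]

lemma pvB_eq_sum (balls : List Int) (x y z : Int) (hneg : ¬ (x < 0 ∨ y < 0 ∨ z < 0)) :
    count_perfect_sets_alt balls x y z
      = ((PySem.List.pyRange 0 (balls.length : Int) 1).map (fun j =>
          (((PySem.List.slice balls none (some j)).filter
              (fun v => decide (|v - PySem.List.pyGetD balls j 0| ≤ x))).map (fun a =>
            ((PySem.List.bisectRight (PySem.List.sorted
                ((PySem.List.slice balls (some (j + 1)) none).filter
                  (fun v => decide (|PySem.List.pyGetD balls j 0 - v| ≤ y)))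
                (fun v => v) false) (a + z) : Int)
             - (PySem.List.bisectLeft (PySem.List.sorted
                ((PySem.List.slice balls (some (j + 1)) none).filter
                  (fun v => decide (|PySem.List.pyGetD balls j 0 - v| ≤ y)))
                (fun v => v) false) (a - z) : Int)))).sum)).sum := by
  simp only [count_perfect_sets_alt, if_neg hneg]
  have hOuter : ∀ (acc : Int), ∀ j ∈ PySem.List.pyRange 0 (balls.length : Int) 1,
      ((PySem.List.slice balls none (some j)).filter
          (fun v => decide (|v - PySem.List.pyGetD balls j 0| ≤ x))).foldl (fun total a =>
        total + ((PySem.List.bisectRight (PySem.List.sorted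
            ((PySem.List.slice balls (some (j + 1)) none).filter
              (fun v => decide (|PySem.List.pyGetD balls j 0 - v| ≤ y)))
            (fun v => v) false) (a + z) : Int)
          - (PySem.List.bisectLeft (PySem.List.sorted
            ((PySem.List.slice balls (some (j + 1)) none).filter
              (fun v => decide (|PySem.List.pyGetD balls j 0 - v| ≤ y)))
            (fun v => v) false) (a - z) : Int))) acc
      = acc + (((PySem.List.slice balls none (some j)).filter
          (fun v => decide (|v - PySem.List.pyGetD balls j 0| ≤ x))).map (fun a =>
            ((PySem.List.bisectRight (PySem.List.sorted
                ((PySem.List.slice balls (some (j + 1)) none).filter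
                  (fun v => decide (|PySem.List.pyGetD balls j 0 - v| ≤ y)))
                (fun v => v) false) (a + z) : Int)
             - (PySem.List.bisectLeft (PySem.List.sorted
                ((PySem.List.slice balls (some (j + 1)) none).filter
                  (fun v => decide (|PySem.List.pyGetD balls j 0 - v| ≤ y)))
                (fun v => v) false) (a - z) : Int)))).sum := by
    intro acc j _
    rw [PySem.List.foldl_add]
  rw [PySem.List.foldl_congr_mem _ _ _ 0 hOuter, PySem.List.foldl_add, zero_add]

lemma pvPerJ (balls : List Int) (x y z j : Int) (hz : 0 ≤ z)
    (hj0 : 0 ≤ j) (hjn : j < (balls.length : Int)) :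
    ((PySem.List.pyRange 0 j 1).map (fun i =>
      ((balls.drop (j + 1).toNat).countP (fun c =>
        decide (|PySem.List.pyGetD balls i 0 - PySem.List.pyGetD balls j 0| ≤ x ∧
                |PySem.List.pyGetD balls j 0 - c| ≤ y ∧
                |PySem.List.pyGetD balls i 0 - c| ≤ z)) : Int))).sum
    = (((PySem.List.slice balls none (some j)).filter
          (fun v => decide (|v - PySem.List.pyGetD balls j 0| ≤ x))).map (fun a =>
        ((PySem.List.bisectRight (PySem.List.sorted
            ((PySem.List.slice balls (some (j + 1)) none).filter
              (fun v => decide (|PySem.List.pyGetD balls j 0 - v| ≤ y)))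
            (fun v => v) false) (a + z) : Int)
         - (PySem.List.bisectLeft (PySem.List.sorted
            ((PySem.List.slice balls (some (j + 1)) none).filter
              (fun v => decide (|PySem.List.pyGetD balls j 0 - v| ≤ y)))
            (fun v => v) false) (a - z) : Int)))).sum := by
  set bj := PySem.List.pyGetD balls j 0 with hbj
  set src := (PySem.List.slice balls (some (j + 1)) none).filter
      (fun v => decide (|bj - v| ≤ y)) with hsrc
  set r := PySem.List.sorted src (fun v => v) false with hr
  -- sortedness of r
  have hs : List.Pairwise (· ≤ ·) r := by
    simpa using PySem.List.sorted_pairwise src (fun v => v)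
  -- the bisect difference is a count over the unsorted suffix filter
  have hbis : ∀ a : Int,
      (PySem.List.bisectRight r (a + z) : Int) - (PySem.List.bisectLeft r (a - z) : Int)
        = ((balls.drop (j + 1).toNat).countP (fun c =>
            decide (a - z ≤ c ∧ c ≤ a + z) && decide (|bj - c| ≤ y)) : Int) := by
    intro a
    rw [pvBisect_window r hs a z hz,
        (PySem.List.sorted_perm src (fun v => v) false).countP_eq]
    rw [hsrc, PySem.List.slice_from balls (by omega : (0:Int) ≤ j + 1), List.countP_filter]
  -- left slice is a take
  rw [PySem.List.slice_to balls hj0]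
  -- rewrite the RHS map body via hbis, then push through the filter
  rw [List.map_congr_left (fun a _ => hbis a), pvSum_filter_map]
  -- LHS: the index map over range j is the value map over the take
  have hlen : (((balls.take j.toNat).length : Nat) : Int) = j := by
    simp [List.length_take]
    omega
  have hmapidx : (PySem.List.pyRange 0 j 1).map (fun i => PySem.List.pyGetD balls i 0)
      = balls.take j.toNat := by
    have hcongr : ∀ i ∈ PySem.List.pyRange 0 j 1,
        PySem.List.pyGetD balls i 0 = PySem.List.pyGetD (balls.take j.toNat) i 0 := by
      intro i hi
      rw [PySem.List.mem_pyRange_one] at hi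
      rw [PySem.List.pyGetD_eq_getElem balls 0 hi.1 (by omega),
          PySem.List.pyGetD_eq_getElem (balls.take j.toNat) 0 hi.1 (by omega),
          List.getElem_take]
    have base := PySem.List.map_pyGetD_pyRange_zero' (balls.take j.toNat) 0
    rw [hlen] at base
    rw [List.map_congr_left hcongr, base]
  have h5 : ((PySem.List.pyRange 0 j 1).map (fun i =>
      ((balls.drop (j + 1).toNat).countP (fun c =>
        decide (|PySem.List.pyGetD balls i 0 - bj| ≤ x ∧
                |bj - c| ≤ y ∧
                |PySem.List.pyGetD balls i 0 - c| ≤ z)) : Int)))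
      = (balls.take j.toNat).map (fun a =>
      ((balls.drop (j + 1).toNat).countP (fun c =>
        decide (|a - bj| ≤ x ∧ |bj - c| ≤ y ∧ |a - c| ≤ z)) : Int)) := by
    rw [← hmapidx, List.map_map]
    rfl
  rw [h5]
  -- pointwise over the take
  refine congrArg List.sum (List.map_congr_left ?_)
  intro a _
  by_cases hpx : |a - bj| ≤ x
  · have hcnt : (balls.drop (j + 1).toNat).countP (fun c =>
        decide (|a - bj| ≤ x ∧ |bj - c| ≤ y ∧ |a - c| ≤ z))
        = (balls.drop (j + 1).toNat).countP (fun c =>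
        decide (a - z ≤ c ∧ c ≤ a + z) && decide (|bj - c| ≤ y)) := by
      refine List.countP_congr (fun c _ => ?_)
      simp only [decide_eq_true_eq, Bool.and_eq_true, abs_le] at *
      constructor
      · intro h; omega
      · intro h; omega
    rw [hcnt]
    simp [hpx]
  · have hcnt : (balls.drop (j + 1).toNat).countP (fun c =>
        decide (|a - bj| ≤ x ∧ |bj - c| ≤ y ∧ |a - c| ≤ z)) = 0 := by
      rw [List.countP_eq_zero]
      intro c _
      simp only [decide_eq_true_eq]
      intro h
      exact hpx h.1
    rw [hcnt]
    simp [hpx]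

theorem pvMain (balls : List Int) (x y z : Int) :
    count_perfect_sets balls x y z = count_perfect_sets_alt balls x y z := by
  by_cases hneg : x < 0 ∨ y < 0 ∨ z < 0
  · -- some bound is negative: both sides count nothing
    simp only [count_perfect_sets_alt, if_pos hneg]
    rw [pvA_eq_sum]
    refine List.sum_eq_zero (fun v hv => ?_)
    obtain ⟨i, _, rfl⟩ := List.mem_map.mp hv
    refine List.sum_eq_zero (fun w hw => ?_)
    obtain ⟨j, _, rfl⟩ := List.mem_map.mp hw
    simp only [Int.natCast_eq_zero]
    rw [List.countP_eq_zero]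
    intro c _
    simp only [decide_eq_true_eq]
    rintro ⟨h1, h2, h3⟩
    have a1 := abs_nonneg (PySem.List.pyGetD balls i 0 - PySem.List.pyGetD balls j 0)
    have a2 := abs_nonneg (PySem.List.pyGetD balls j 0 - c)
    have a3 := abs_nonneg (PySem.List.pyGetD balls i 0 - c)
    rcases hneg with h | h | h <;> omega
  · have hz : 0 ≤ z := by omega
    rw [pvA_eq_sum, pvB_eq_sum balls x y z hneg, pvSwap]
    refine congrArg List.sum (List.map_congr_left (fun j hj => ?_))
    rw [PySem.List.mem_pyRange_one] at hj
    exact pvPerJ balls x y z j hz hj.1 hj.2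

-- ===== VERDICT (by name: the statement is the Claim_ definition above) =====
theorem count_perfect_sets_spec : Claim_equal_count_perfect_sets := by
  intro balls x y z _
  unfold Spec_count_perfect_sets
  exact pvMain balls x y z
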